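-- pv_equiv track=rewrite | github.com/pypi-data/pypi-mirror-34 | packages/pyyacp/pyyacp-0.5-py2.py3-none-any.whl/pyyacp/datatable.py | create_column_names
-- ===== SOURCE A (Python) =====
-- def create_column_names(header_rows, cols=None):
--     if cols is None:
--         cols = len(header_rows)
--     names=[]
--     done=False
--     if len(header_rows) >= 1:
--         #we found at least one header row
--
--         #lets check if there is any header row with values in each column
--         for h_row in header_rows:
--             if all( h is not None and len(h.strip())>0 for h in h_row):
--                 #all header have a non empty value
--                 names = [h.strip() for h in h_row]
--                 done = True
--                 break
--         if not done:
--             #ok second attemp, take always the first available header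
--             h_transposed = list(map(list, zip(*header_rows)))
--             for i, hs in enumerate(h_transposed):
--                 try:
--                     name=next(s for s in hs if s and len(s.strip())>0)
--                 except:
--                     name="miss{}".format(i+1)
--                 names.append(name)
--     else:
--         names = ['col{}'.format(i) for i in range(1, cols+1)]
--
--     ##check that we do not have duplicates
--     newlist = []
--     for i, v in enumerate(names):
--         totalcount = names.count(v)
--         count = names[:i].count(v)
--         newlist.append(v + str(count + 1) if totalcount > 1 else v)
--     names = newlist
--
--     return names
-- ===== SOURCE B (Python) =====
-- def create_column_names(header_rows, cols=None):
--     if cols is None: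
--         cols = len(header_rows)
--     if not header_rows:
--         names = ['col{}'.format(i) for i in range(1, cols + 1)]
--     else:
--         # one fused streaming pass over the rows: track the first fully non-empty
--         # row AND the per-column first usable cell at the same time (no transpose,
--         # no staged second loop)
--         width = min(len(r) for r in header_rows)
--         full = None
--         firsts = [None] * width
--         for row in header_rows:
--             if full is None and all(h is not None and h.strip() for h in row):
--                 full = row
--             firsts = [f if f is not None else (row[i] if row[i] and row[i].strip() else None)
--                       for i, f in enumerate(firsts)]
--         if full is not None:
--             names = [h.strip() for h in full]
--         else:
--             names = [f if f is not None else "miss{}".format(i + 1) for i, f in enumerate(firsts)]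
--     # dedup: group the indices of each name, then scatter occurrence suffixes per group
--     groups = {}
--     for i, v in enumerate(names):
--         groups.setdefault(v, []).append(i)
--     result = list(names)
--     for v, idxs in groups.items():
--         if len(idxs) > 1:
--             for j, idx in enumerate(idxs):
--                 result[idx] = v + str(j + 1)
--     return result
-- ===== Notes on version B (the rewrite author's own statement) =====
-- stated objective: alternative
-- what changed: B makes one fused streaming pass over the header rows that simultaneously tracks the first fully non-empty row and a per-column first-usable-cell accumulator (no transposition and no staged second loop), and deduplicates by grouping each name's indices into a dict in one pass and then scattering occurrence suffixes per group into a copy of the list, instead of A's break-flag row scan, zip(*rows) transpose with per-column next(), and per-position whole-list count plus prefix recount.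
import Mathlib
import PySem

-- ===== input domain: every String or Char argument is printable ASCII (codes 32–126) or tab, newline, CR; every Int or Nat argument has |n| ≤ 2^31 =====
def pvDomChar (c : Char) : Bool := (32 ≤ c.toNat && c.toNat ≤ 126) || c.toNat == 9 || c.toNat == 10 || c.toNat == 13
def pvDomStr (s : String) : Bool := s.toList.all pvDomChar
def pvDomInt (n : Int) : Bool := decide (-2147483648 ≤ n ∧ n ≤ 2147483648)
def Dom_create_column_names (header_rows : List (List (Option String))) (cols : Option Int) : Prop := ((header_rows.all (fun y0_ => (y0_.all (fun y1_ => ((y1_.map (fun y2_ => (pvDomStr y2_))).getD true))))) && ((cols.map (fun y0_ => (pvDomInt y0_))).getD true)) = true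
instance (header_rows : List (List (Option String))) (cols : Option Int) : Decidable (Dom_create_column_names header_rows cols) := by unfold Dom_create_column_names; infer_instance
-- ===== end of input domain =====

-- B replaces A's staged scans (break-flag row loop, then zip-transpose with per-column next(),
-- then a quadratic count/prefix-recount dedup) by ONE fused streaming pass over the rows that
-- tracks the first fully non-empty row and the per-column first usable cell together, followed
-- by a group-the-indices-then-scatter dedup; objective: alternative decomposition.

-- ===== PORT A =====

-- 'h is not None and len(h.strip())>0' (truthiness of None / the length test), shared by both Pythons verbatim
def fullPred (h : Option String) : Bool :=
  match h with
  | none => false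
  | some s => decide (0 < (PySem.Str.strip s).length)

-- 's and len(s.strip())>0' resp. 's and s.strip()' (identical truth value in both Pythons)
def truthyHeader (s : Option String) : Bool :=
  match s with
  | none => false
  | some t => decide (t ≠ "") && decide (0 < (PySem.Str.strip t).length)

-- termination helper for pyZipStar (cited in decreasing_by)
theorem sum_length_map_tail_le (rs : List (List (Option String))) :
    (((rs.map List.tail).map List.length).sum) ≤ ((rs.map List.length).sum) := by
  induction rs with
  | nil => simp
  | cons r rs ih =>
    simp only [List.map_cons, List.sum_cons]
    exact Nat.add_le_add (by cases r <;> simp) ih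

-- zip(*header_rows): repeatedly take the heads while every row is non-empty (Python's zip truncates at the shortest row); exact
def pyZipStar (rows : List (List (Option String))) : List (List (Option String)) :=
  match rows with
  | [] => []
  | r :: rs =>
    if h : ((r :: rs).all (fun x => !x.isEmpty)) then
      ((r :: rs).filterMap List.head?) :: pyZipStar ((r :: rs).map List.tail)
    else []
termination_by (rows.map List.length).sum
decreasing_by
  simp only [List.all_cons, Bool.and_eq_true, Bool.not_eq_true', List.isEmpty_eq_false_iff] at h
  simp only [List.map_cons, List.sum_cons]
  have h1 : r.tail.length < r.length := by
    cases r with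
    | nil => exact absurd rfl h.1
    | cons a t => simp
  exact Nat.add_lt_add_of_lt_of_le h1 (sum_length_map_tail_le rs)

def create_column_names (header_rows : List (List (Option String))) (cols : Option Int) : List String :=
  let cols' : Int := match cols with | none => (header_rows.length : Int) | some c => c
  let names : List String :=
    if (header_rows.length : Int) ≥ 1 then
      -- first loop: break at the first all-non-empty header row, keeping a done flag
      let st := header_rows.foldl
        (fun st row =>
          if st.2 then st
          else if row.all fullPred then (row.map (fun h => PySem.Str.strip (h.getD "")), true)
          else st) (([] : List String), false)
      if !st.2 then
        -- second attempt: transpose, then per column the first truthy header ('next' = find?), else "miss{i+1}"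
        let t := pyZipStar header_rows
        (PySem.List.enumerate t 0).foldl
          (fun ns p =>
            ns ++ [match p.2.find? truthyHeader with
                   | some s => s.getD ""            -- the found cell is 'some _' by the predicate
                   | none => "miss" ++ PySem.Int.toStr (p.1 + 1)]) st.1
      else st.1
    else
      (PySem.List.pyRange 1 (cols' + 1) 1).map (fun i => "col" ++ PySem.Int.toStr i)
  -- dedup: per position, recount the whole list and the prefix
  (PySem.List.enumerate names 0).foldl
    (fun nl p =>
      nl ++ [if names.count p.2 > 1
             then p.2 ++ PySem.Int.toStr ((PySem.List.slice names none (some p.1)).count p.2 + 1)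
             else p.2]) []

-- ===== PORT B =====

def create_column_names_alt (header_rows : List (List (Option String))) (cols : Option Int) : List String :=
  let cols' : Int := match cols with | none => (header_rows.length : Int) | some c => c
  let names : List String :=
    if header_rows.isEmpty then
      (PySem.List.pyRange 1 (cols' + 1) 1).map (fun i => "col" ++ PySem.Int.toStr i)
    else
      -- width = min(len(r) for r in header_rows); '[None]*width' (width ≥ 0, so toNat is exact)
      let width : Int :=
        (PySem.List.min? (header_rows.map (fun r => (r.length : Int))) (fun x => x)).getD 0
      let init : List (Option String) := List.replicate width.toNat none
      -- the fused pass: full = first all-usable row; firsts[i] = first usable cell of column i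
      let st := header_rows.foldl
        (fun (st : Option (List (Option String)) × List (Option String)) row =>
          (if st.1.isNone && row.all fullPred then some row else st.1,
           (PySem.List.enumerate st.2 0).map
             (fun p => match p.2 with
               | some s => some s
               | none =>
                 let c := PySem.List.pyGetD row p.1 none
                 if truthyHeader c then c else none)))
        ((none : Option (List (Option String))), init)
      match st.1 with
      | some full => full.map (fun h => PySem.Str.strip (h.getD ""))
      | none =>
        (PySem.List.enumerate st.2 0).map
          (fun p => match p.2 with
            | some s => s
            | none => "miss" ++ PySem.Int.toStr (p.1 + 1))
  -- groups.setdefault(v, []).append(i)  ==  modify v [] (· ++ [i])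
  let groups : PySem.Dict String (List Int) :=
    (PySem.List.enumerate names 0).foldl
      (fun d p => d.modify p.2 [] (fun l => l ++ [p.1])) PySem.Dict.empty
  -- scatter: suffix every index of each duplicated name
  groups.items.foldl
    (fun res p =>
      if p.2.length > 1 then
        (PySem.List.enumerate p.2 0).foldl
          (fun r q => PySem.List.pySetD r q.2 (p.1 ++ PySem.Int.toStr (q.1 + 1))) res
      else res) names

-- ===== PRECONDITION & SPEC =====
def Spec_create_column_names (header_rows : List (List (Option String))) (cols : Option Int) (out : List String) : Prop := out = create_column_names_alt header_rows cols
instance (header_rows : List (List (Option String))) (cols : Option Int) (out : List String) : Decidable (Spec_create_column_names header_rows cols out) := by unfold Spec_create_column_names; infer_instance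

-- ===== CLAIM (what is proved, stated in full; the proofs are below) =====
def Claim_equal_create_column_names : Prop := ∀ (header_rows : List (List (Option String))) (cols : Option Int), Dom_create_column_names header_rows cols → Spec_create_column_names header_rows cols (create_column_names header_rows cols)

-- ===== LEMMAS AND PROOFS =====

def eIdxs (v : String) (l : List String) (s : Int) : List Int :=
  ((PySem.List.enumerate l s).filter (fun p => p.2 == v)).map (·.1)

theorem eIdxs_nil (v : String) (s : Int) : eIdxs v [] s = [] := rfl

theorem eIdxs_cons (v : String) (a : String) (l : List String) (s : Int) :
    eIdxs v (a :: l) s = (if a == v then [s] else []) ++ eIdxs v l (s + 1) := by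
  simp only [eIdxs, PySem.List.enumerate_cons, List.filter_cons]
  by_cases h : a == v <;> simp [h]

theorem eIdxs_length (v : String) (l : List String) (s : Int) :
    (eIdxs v l s).length = l.count v := by
  induction l generalizing s with
  | nil => rfl
  | cons a l ih =>
    rw [eIdxs_cons, List.length_append, ih, List.count_cons]
    by_cases h : a == v <;> simp [h] <;> omega

theorem eIdxs_lb (v : String) (l : List String) (s : Int) (x : Int) (hx : x ∈ eIdxs v l s) :
    s ≤ x ∧ x < s + l.length := by
  induction l generalizing s with
  | nil => simp [eIdxs_nil] at hx
  | cons a l ih =>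
    rw [eIdxs_cons] at hx
    simp only [List.length_cons]
    rcases List.mem_append.mp hx with h | h
    · by_cases hav : a == v <;> simp [hav] at h
      subst h; constructor <;> [omega; (push_cast; omega)]
    · have := ih (s + 1) h; push_cast at this ⊢; omega

theorem eIdxs_nodup (v : String) (l : List String) (s : Int) : (eIdxs v l s).Nodup := by
  induction l generalizing s with
  | nil => simp [eIdxs_nil]
  | cons a l ih =>
    rw [eIdxs_cons]
    by_cases hav : a == v <;> simp [hav]
    · refine ⟨fun h => ?_, ih (s + 1)⟩
      have := eIdxs_lb v l (s + 1) s h; omega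
    · exact ih (s + 1)

theorem pvCastSucc (s : Int) (k : Nat) : s + ((k + 1 : Nat) : Int) = (s + 1) + (k : Int) := by
  push_cast; ring

theorem eIdxs_mem (v : String) (l : List String) (s : Int) (k : Nat) (hk : k < l.length)
    (h : l[k] = v) : s + (k : Int) ∈ eIdxs v l s := by
  induction l generalizing s k with
  | nil => simp at hk
  | cons a l ih =>
    rw [eIdxs_cons]
    cases k with
    | zero => simp at h; subst h; simp
    | succ k =>
      simp only [List.length_cons, Nat.add_lt_add_iff_right] at hk
      simp only [List.getElem_cons_succ] at h
      rw [pvCastSucc]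
      exact List.mem_append.mpr (Or.inr (ih (s + 1) k hk h))

theorem eIdxs_not_mem (v : String) (l : List String) (s : Int) (k : Nat) (hk : k < l.length)
    (h : l[k] ≠ v) : s + (k : Int) ∉ eIdxs v l s := by
  induction l generalizing s k with
  | nil => simp at hk
  | cons a l ih =>
    rw [eIdxs_cons]
    intro hmem
    rcases List.mem_append.mp hmem with hm | hm
    · by_cases hav : a == v <;> simp [hav] at hm
      have hk0 : k = 0 := by omega
      subst hk0; simp at h; exact h (beq_iff_eq.mp hav)
    · cases k with
      | zero =>
        have := eIdxs_lb v l (s + 1) (s + 0) hm; omega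
      | succ k =>
        simp only [List.length_cons, Nat.add_lt_add_iff_right] at hk
        simp only [List.getElem_cons_succ] at h
        rw [pvCastSucc] at hm
        exact ih (s + 1) k hk h hm

theorem eIdxs_idxOf (v : String) (l : List String) (s : Int) (k : Nat) (hk : k < l.length)
    (h : l[k] = v) : (eIdxs v l s).idxOf (s + (k : Int)) = (l.take k).count v := by
  induction l generalizing s k with
  | nil => simp at hk
  | cons a l ih =>
    rw [eIdxs_cons]
    cases k with
    | zero =>
      simp at h; subst h
      simp [List.idxOf, List.findIdx_cons]
    | succ k =>
      simp only [List.length_cons, Nat.add_lt_add_iff_right] at hk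
      simp only [List.getElem_cons_succ] at h
      rw [List.take_succ_cons, List.count_cons]
      by_cases hav : a == v
      · rw [if_pos hav, List.singleton_append, List.idxOf, List.findIdx_cons]
        have hfalse : (s == s + ((k + 1 : Nat) : Int)) = false := by
          simp [beq_iff_eq]; push_cast; omega
        rw [hfalse]
        simp only [cond_false]
        rw [pvCastSucc]
        have := ih (s + 1) k hk h
        rw [List.idxOf] at this
        rw [this]
        simp [hav, beq_iff_eq.mp hav]
      · have hf : (a == v) = false := by simpa using hav
        rw [if_neg (by simp [hf]), List.nil_append, pvCastSucc, ih (s + 1) k hk h]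
        simp [hf]

theorem scatter_length (f : Int → String) (L : List Int) (s : Int) (r : List String) :
    ((PySem.List.enumerate L s).foldl (fun r q => PySem.List.pySetD r q.2 (f q.1)) r).length
      = r.length := by
  induction L generalizing s r with
  | nil => rfl
  | cons x L ih =>
    rw [PySem.List.enumerate_cons, List.foldl_cons, ih, PySem.List.length_pySetD]

theorem scatter_get? (f : Int → String) (L : List Int) (hnd : L.Nodup) (r : List String)
    (hb : ∀ x ∈ L, 0 ≤ x ∧ x < (r.length : Int)) (s : Int) (i : Nat) :
    ((PySem.List.enumerate L s).foldl (fun r q => PySem.List.pySetD r q.2 (f q.1)) r)[i]? =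
      if (i : Int) ∈ L then some (f (s + (L.idxOf (i : Int) : Nat))) else r[i]? := by
  induction L generalizing s r with
  | nil => simp
  | cons x L ih =>
    rw [PySem.List.enumerate_cons, List.foldl_cons]
    have hx := hb x (List.mem_cons_self)
    obtain ⟨n, hn⟩ : ∃ n : Nat, x = (n : Int) := ⟨x.toNat, (Int.toNat_of_nonneg hx.1).symm⟩
    subst hn
    have hnlen : n < r.length := by exact_mod_cast hx.2
    have hnd' := (List.nodup_cons.mp hnd).2
    have hxnot := (List.nodup_cons.mp hnd).1
    have hb' : ∀ y ∈ L, 0 ≤ y ∧ y < ((PySem.List.pySetD r (n : Int) (f s)).length : Int) := by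
      intro y hy; rw [PySem.List.length_pySetD]; exact hb y (List.mem_cons_of_mem _ hy)
    rw [ih hnd' _ hb' (s + 1)]
    by_cases hiL : (i : Int) ∈ L
    · rw [if_pos hiL, if_pos (List.mem_cons_of_mem _ hiL)]
      have hne : ((n : Int) == (i : Int)) = false := by
        simp [beq_iff_eq]; rintro rfl; exact hxnot hiL
      rw [List.idxOf_cons, hne]
      simp only [cond_false]
      congr 1
      push_cast
      ring
    · rw [if_neg hiL]
      by_cases hin : (i : Int) = (n : Int)
      · have hieq : i = n := by exact_mod_cast hin
        subst hieq
        rw [if_pos (by simp), List.idxOf_cons]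
        simp only [beq_self_eq_true, cond_true, Nat.cast_zero, add_zero]
        rw [PySem.List.pySetD_natCast, List.getElem?_set_self (by omega)]
      · rw [if_neg (by simp [hin, hiL]), PySem.List.pySetD_natCast,
          List.getElem?_set_ne (by intro h; exact hin (by exact_mod_cast h.symm))]

-- one scatter step of B's second dedup loop
def stepB (res : List String) (p : String × List Int) : List String :=
  if p.2.length > 1 then
    (PySem.List.enumerate p.2 0).foldl
      (fun r q => PySem.List.pySetD r q.2 (p.1 ++ PySem.Int.toStr (q.1 + 1))) res
  else res

theorem stepB_length (res : List String) (p : String × List Int) :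
    (stepB res p).length = res.length := by
  unfold stepB
  split
  · exact scatter_length (fun j => p.1 ++ PySem.Int.toStr (j + 1)) p.2 0 res
  · rfl

theorem outer_get? (names : List String) (K : List String) (hK : K.Nodup)
    (r : List String) (hlen : r.length = names.length) (i : Nat) (hi : i < names.length) :
    ((K.map (fun v => (v, eIdxs v names 0))).foldl stepB r)[i]? =
      if names[i] ∈ K ∧ 1 < names.count names[i]
      then some (names[i] ++ PySem.Int.toStr (((names.take i).count names[i] : Nat) + 1))
      else r[i]? := by
  induction K generalizing r with
  | nil => simp
  | cons v K ih =>
    rw [List.map_cons, List.foldl_cons]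
    have hndK := (List.nodup_cons.mp hK).2
    have hvK := (List.nodup_cons.mp hK).1
    have hlen1 : (stepB r (v, eIdxs v names 0)).length = names.length := by
      rw [stepB_length]; exact hlen
    rw [ih hndK _ hlen1]
    by_cases hiv : names[i] = v
    · have hmem : (i : Int) ∈ eIdxs v names 0 := by
        have := eIdxs_mem v names 0 i hi hiv; simpa using this
      have hnotK : names[i] ∉ K := by rw [hiv]; exact hvK
      rw [if_neg (by rintro ⟨h1, _⟩; exact hnotK h1)]
      unfold stepB
      dsimp only
      by_cases hcnt : 1 < names.count v
      · have hlong : (eIdxs v names 0).length > 1 := by rw [eIdxs_length]; omega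
        rw [if_pos hlong]
        rw [scatter_get? (fun j => v ++ PySem.Int.toStr (j + 1)) (eIdxs v names 0) (eIdxs_nodup v names 0) r
            (fun x hx => by have := eIdxs_lb v names 0 x hx; constructor <;> [omega; (rw [hlen]; omega)]) 0 i]
        rw [if_pos hmem]
        have hidx : (eIdxs v names 0).idxOf (i : Int) = (names.take i).count v := by
          have := eIdxs_idxOf v names 0 i hi hiv; simpa using this
        rw [if_pos ⟨by simp [hiv], by rw [hiv]; exact hcnt⟩, hidx, hiv]
        congr 2
        push_cast; ring
      · have hshort : ¬ (eIdxs v names 0).length > 1 := by rw [eIdxs_length]; omega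
        rw [if_neg hshort]
        rw [if_neg (by rintro ⟨_, h2⟩; rw [hiv] at h2; exact hcnt h2)]
    · have hnot : (i : Int) ∉ eIdxs v names 0 := by
        have := eIdxs_not_mem v names 0 i hi hiv; simpa using this
      have hstep : (stepB r (v, eIdxs v names 0))[i]? = r[i]? := by
        unfold stepB
        dsimp only
        split
        · rw [scatter_get? (fun j => v ++ PySem.Int.toStr (j + 1)) (eIdxs v names 0) (eIdxs_nodup v names 0) r
            (fun x hx => by have := eIdxs_lb v names 0 x hx; constructor <;> [omega; (rw [hlen]; omega)]) 0 i]
          rw [if_neg hnot]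
        · rfl
      rw [hstep]
      by_cases hmemK : names[i] ∈ K ∧ 1 < names.count names[i]
      · rw [if_pos hmemK, if_pos ⟨List.mem_cons_of_mem _ hmemK.1, hmemK.2⟩]
      · rw [if_neg hmemK, if_neg (fun hc => by
          obtain ⟨h1, h2⟩ := hc
          rcases List.mem_cons.mp h1 with h | h
          · exact hiv h
          · exact hmemK ⟨h, h2⟩)]

theorem foldl_stepB_length (G : List (String × List Int)) (r : List String) :
    (G.foldl stepB r).length = r.length := by
  induction G generalizing r with
  | nil => rfl
  | cons g G ih => rw [List.foldl_cons, ih, stepB_length]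

theorem groups_getD (names : List String) (c : String) :
    ((PySem.List.enumerate names 0).foldl
        (fun d p => d.modify p.2 [] (fun l => l ++ [p.1])) PySem.Dict.empty).getD c []
      = eIdxs c names 0 := by
  have h1 : (PySem.List.enumerate names 0).foldl
        (fun d p => d.modify p.2 [] (fun l => l ++ [p.1])) PySem.Dict.empty
      = ((PySem.List.enumerate names 0).map Prod.swap).foldl
        (fun d p => d.modify p.1 [] (fun l => l ++ [p.2])) PySem.Dict.empty := by
    rw [List.foldl_map]
    rfl
  rw [h1, PySem.Dict.getD_foldl_modify_append]
  rw [List.filter_map, List.map_map]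
  simp only [PySem.Dict.getD_empty, List.nil_append]
  rfl

theorem groups_keys (names : List String) :
    ((PySem.List.enumerate names 0).foldl
        (fun d p => d.modify p.2 [] (fun l => l ++ [p.1])) PySem.Dict.empty).keys
      = PySem.Set.ofList names := by
  have := PySem.Dict.keys_foldl_modify_key (PySem.List.enumerate names 0) (fun p => p.2)
      ([] : List Int) (fun _ p => fun l => l ++ [p.1]) PySem.Dict.empty
  simp only [PySem.Dict.keys_empty] at this
  rw [this, PySem.List.map_snd_enumerate, PySem.Set.update_nil_left]

theorem dedup_eq (names : List String) :
    (((PySem.List.enumerate names 0).foldl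
        (fun d p => d.modify p.2 [] (fun l => l ++ [p.1])) PySem.Dict.empty).items.foldl
      (fun res p =>
        if p.2.length > 1 then
          (PySem.List.enumerate p.2 0).foldl
            (fun r q => PySem.List.pySetD r q.2 (p.1 ++ PySem.Int.toStr (q.1 + 1))) res
        else res) names)
    = (PySem.List.enumerate names 0).foldl
        (fun nl p =>
          nl ++ [if names.count p.2 > 1
                 then p.2 ++ PySem.Int.toStr ((PySem.List.slice names none (some p.1)).count p.2 + 1)
                 else p.2]) [] := by
  have hitems : ((PySem.List.enumerate names 0).foldl
        (fun d p => d.modify p.2 [] (fun l => l ++ [p.1])) PySem.Dict.empty).items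
      = (PySem.Set.ofList names).map (fun v => (v, eIdxs v names 0)) := by
    rw [PySem.Dict.items_eq_map_keys _ (by rw [groups_keys]; exact PySem.Set.nodup_ofList names) []]
    rw [groups_keys]
    exact List.map_congr_left (fun v _ => by rw [groups_getD])
  rw [hitems]
  rw [PySem.List.foldl_append_singleton_eq_map, List.nil_append]
  have hstep : (fun (res : List String) (p : String × List Int) =>
        if p.2.length > 1 then
          (PySem.List.enumerate p.2 0).foldl
            (fun r q => PySem.List.pySetD r q.2 (p.1 ++ PySem.Int.toStr (q.1 + 1))) res
        else res) = stepB := rfl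
  rw [hstep]
  apply List.ext_getElem?
  intro i
  by_cases hi : i < names.length
  · rw [outer_get? names (PySem.Set.ofList names) (PySem.Set.nodup_ofList names) names rfl i hi]
    have hmem : names[i] ∈ PySem.Set.ofList names :=
      (PySem.Set.mem_ofList names _).mpr (names.getElem_mem hi)
    rw [List.getElem?_map, PySem.List.getElem?_enumerate]
    rw [List.getElem?_eq_getElem hi]
    simp only [Option.map_some]
    rw [zero_add]
    have hslice : PySem.List.slice names none (some (i : Int)) = names.take i :=
      PySem.List.slice_to_natCast names i
    by_cases hcnt : 1 < names.count names[i]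
    · rw [if_pos ⟨hmem, hcnt⟩, if_pos (by omega), hslice]
    · rw [if_neg (by rintro ⟨_, h⟩; exact hcnt h), if_neg (by omega)]
  · have h1 : names.length ≤ i := by omega
    rw [List.getElem?_eq_none (by rw [foldl_stepB_length]; omega),
        List.getElem?_eq_none (by rw [List.length_map, PySem.List.length_enumerate]; omega)]

-- ===== phase lemmas =====

theorem pvMinW_le_init (rs : List (List (Option String))) (a : Nat) :
    rs.foldl (fun m x => min m x.length) a ≤ a := by
  induction rs generalizing a with
  | nil => simp
  | cons x rs ih => exact le_trans (ih _) (min_le_left _ _)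

theorem pvMinW_le_mem (rs : List (List (Option String))) (a : Nat) (x : List (Option String))
    (hx : x ∈ rs) : rs.foldl (fun m x => min m x.length) a ≤ x.length := by
  induction rs generalizing a with
  | nil => simp at hx
  | cons y rs ih =>
    rcases List.mem_cons.mp hx with h | h
    · subst h; exact le_trans (pvMinW_le_init rs _) (min_le_right _ _)
    · exact ih _ h

def minW (rows : List (List (Option String))) : Nat :=
  match rows with
  | [] => 0
  | r :: rs => rs.foldl (fun m x => min m x.length) r.length

theorem pvMinW_pos (rs : List (List (Option String))) (a : Nat) (ha : 0 < a)
    (h : ∀ x ∈ rs, x ≠ []) : 0 < rs.foldl (fun m x => min m x.length) a := by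
  induction rs generalizing a with
  | nil => simpa
  | cons x rs ih =>
    refine ih _ ?_ (fun y hy => h y (List.mem_cons_of_mem _ hy))
    have hx : x ≠ [] := h x List.mem_cons_self
    have : 0 < x.length := List.length_pos_of_ne_nil hx
    exact lt_min_iff.mpr ⟨ha, this⟩

theorem pvMinW_tail (rs : List (List (Option String))) (a : Nat) (ha : 0 < a)
    (h : ∀ x ∈ rs, x ≠ []) :
    (rs.map List.tail).foldl (fun m x => min m x.length) (a - 1)
      = rs.foldl (fun m x => min m x.length) a - 1 := by
  induction rs generalizing a with
  | nil => simp
  | cons x rs ih =>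
    rw [List.map_cons, List.foldl_cons, List.foldl_cons]
    have hx : 0 < x.length := List.length_pos_of_ne_nil (h x List.mem_cons_self)
    rw [List.length_tail]
    rw [show min (a - 1) (x.length - 1) = min a x.length - 1 by omega]
    exact ih _ (by omega) (fun y hy => h y (List.mem_cons_of_mem _ hy))

theorem pvHeads (rows : List (List (Option String))) (h : ∀ x ∈ rows, x ≠ []) :
    rows.filterMap List.head? = rows.map (fun r => r.getD 0 none) := by
  induction rows with
  | nil => rfl
  | cons r rs ih =>
    cases r with
    | nil => exact absurd rfl (h [] List.mem_cons_self)
    | cons a t =>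
      rw [List.filterMap_cons, List.map_cons]
      simp only [List.head?_cons, List.getD_cons_zero]
      rw [ih (fun y hy => h y (List.mem_cons_of_mem _ hy))]

theorem pvTailGetD (r : List (Option String)) (k : Nat) :
    r.tail.getD k none = r.getD (k + 1) none := by
  cases r <;> simp [List.getD]

theorem pyZipStar_spec (rows : List (List (Option String))) :
    pyZipStar rows = (List.range (minW rows)).map (fun k => rows.map (fun r => r.getD k none)) := by
  fun_induction pyZipStar rows with
  | case1 => rfl
  | case2 r rs h ih =>
    simp only [List.all_cons, Bool.and_eq_true, Bool.not_eq_true', List.isEmpty_eq_false_iff] at h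
    have hall : ∀ x ∈ r :: rs, x ≠ [] := by
      intro x hx; rcases List.mem_cons.mp hx with h1 | h1
      · subst h1; exact h.1
      · have := List.all_eq_true.mp h.2 x h1; simpa using this
    have hw : 0 < minW (r :: rs) := by
      simp only [minW]
      exact pvMinW_pos rs r.length (List.length_pos_of_ne_nil h.1)
        (fun y hy => hall y (List.mem_cons_of_mem _ hy))
    have hwt : minW ((r :: rs).map List.tail) = minW (r :: rs) - 1 := by
      simp only [minW, List.map_cons, List.length_tail]
      exact pvMinW_tail rs r.length (List.length_pos_of_ne_nil h.1)
        (fun y hy => hall y (List.mem_cons_of_mem _ hy))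
    rw [ih, hwt]
    conv_rhs => rw [show minW (r :: rs) = (minW ((r :: rs).map List.tail)) + 1 from by omega,
      List.range_succ_eq_map, List.map_cons, List.map_map]
    rw [hwt]
    congr 1
    · rw [pvHeads _ hall]
    · apply List.map_congr_left
      intro k _
      simp only [Function.comp]
      rw [List.map_map]
      apply List.map_congr_left
      intro x _
      simp only [Function.comp]
      rw [pvTailGetD]
  | case3 r rs h =>
    simp only [List.all_cons, Bool.and_eq_true, Bool.not_eq_true', List.isEmpty_eq_false_iff] at h
    have hw : minW (r :: rs) = 0 := by
      simp only [minW]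
      by_cases hr : r = []
      · have := pvMinW_le_init rs r.length
        subst hr; simp at this ⊢; omega
      · have : ∃ x ∈ rs, x = [] := by
          by_contra hc
          push_neg at hc
          exact h ⟨hr, List.all_eq_true.mpr (fun x hx => by simpa using hc x hx)⟩
        obtain ⟨x, hx, rfl⟩ := this
        have := pvMinW_le_mem rs r.length _ hx
        simpa using this
    rw [hw]
    rfl

theorem pvCastFoldlMin (rs : List (List (Option String))) (a : Nat) :
    rs.foldl (fun (m : Int) x => min m (x.length : Int)) (a : Int)
      = ((rs.foldl (fun m x => min m x.length) a : Nat) : Int) := by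
  induction rs generalizing a with
  | nil => rfl
  | cons x rs ih =>
    rw [List.foldl_cons, List.foldl_cons, ← Nat.cast_min, ih]

theorem minW_min? (rows : List (List (Option String))) (h : rows ≠ []) :
    (PySem.List.min? (rows.map (fun r => (r.length : Int))) (fun x => x)).getD 0
      = ((minW rows : Nat) : Int) := by
  cases rows with
  | nil => exact absurd rfl h
  | cons r rs =>
    rw [List.map_cons, PySem.List.min?_id_cons, Option.getD_some, List.foldl_map]
    exact pvCastFoldlMin rs r.length

theorem pvFlagStay (p : Option String → Bool) (f : List (Option String) → List String)
    (rows : List (List (Option String))) (st : List String × Bool) (h : st.2 = true) :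
    rows.foldl (fun st row => if st.2 then st
        else if row.all p then (f row, true) else st) st = st := by
  induction rows with
  | nil => rfl
  | cons r rs ih => rw [List.foldl_cons, if_pos h, ih]

theorem pvFlagFold (p : Option String → Bool) (f : List (Option String) → List String)
    (rows : List (List (Option String))) :
    rows.foldl (fun st row => if st.2 then st
        else if row.all p then (f row, true) else st) (([] : List String), false)
      = match rows.find? (fun row => row.all p) with
        | some r => (f r, true)
        | none => (([] : List String), false) := by
  induction rows with
  | nil => rfl
  | cons r rs ih =>
    rw [List.foldl_cons, List.find?_cons]
    by_cases hp : r.all p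
    · rw [if_neg (by simp), if_pos hp, pvFlagStay p f rs _ rfl, hp]
    · have : (r.all p) = false := by simpa using hp
      rw [if_neg (by simp), if_neg (by simp [this]), ih, this]

-- ===== fused-pass lemmas (B) =====

-- the per-row update of the per-column accumulator
def firstsStep (b : List (Option String)) (row : List (Option String)) : List (Option String) :=
  (PySem.List.enumerate b 0).map
    (fun p => match p.2 with
      | some s => some s
      | none =>
        let c := PySem.List.pyGetD row p.1 none
        if truthyHeader c then c else none)

-- the per-row update of the full-row accumulator
def fullStep (a : Option (List (Option String))) (row : List (Option String)) :
    Option (List (Option String)) :=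
  if a.isNone && row.all fullPred then some row else a

theorem pair_fold_split (rows : List (List (Option String)))
    (a : Option (List (Option String))) (b : List (Option String)) :
    rows.foldl
      (fun (st : Option (List (Option String)) × List (Option String)) row =>
        (fullStep st.1 row, firstsStep st.2 row)) (a, b)
      = (rows.foldl fullStep a, rows.foldl firstsStep b) := by
  induction rows generalizing a b with
  | nil => rfl
  | cons r rs ih => rw [List.foldl_cons, List.foldl_cons, List.foldl_cons, ih]

theorem fullStep_some (rows : List (List (Option String))) (r : List (Option String)) :
    rows.foldl fullStep (some r) = some r := by
  induction rows with
  | nil => rfl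
  | cons x rs ih =>
    have hs : fullStep (some r) x = some r := by simp [fullStep]
    rw [List.foldl_cons, hs]; exact ih

theorem fullFold_find (rows : List (List (Option String))) :
    rows.foldl fullStep none = rows.find? (fun row => row.all fullPred) := by
  induction rows with
  | nil => rfl
  | cons r rs ih =>
    rw [List.foldl_cons, List.find?_cons]
    by_cases hp : r.all fullPred
    · have hs : fullStep none r = some r := by simp [fullStep, hp]
      rw [hs, fullStep_some, hp]
    · have hpf : (r.all fullPred) = false := by simpa using hp
      have hs : fullStep none r = none := by simp [fullStep, hpf]
      rw [hs, ih, hpf]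

theorem firstsStep_length (b : List (Option String)) (row : List (Option String)) :
    (firstsStep b row).length = b.length := by
  unfold firstsStep
  rw [List.length_map, PySem.List.length_enumerate]

theorem firstsFold_length (rows : List (List (Option String))) (b : List (Option String)) :
    (rows.foldl firstsStep b).length = b.length := by
  induction rows generalizing b with
  | nil => rfl
  | cons r rs ih => rw [List.foldl_cons, ih, firstsStep_length]

theorem firstsStep_get? (b row : List (Option String)) (k : Nat) :
    (firstsStep b row)[k]? = b[k]?.map
      (fun f => match f with
        | some s => some s
        | none => if truthyHeader (row.getD k none) then row.getD k none else none) := by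
  unfold firstsStep
  rw [List.getElem?_map, PySem.List.getElem?_enumerate, Option.map_map]
  cases hb : b[k]? with
  | none => rfl
  | some f =>
    simp only [Option.map_some, Function.comp]
    cases f with
    | some s => rfl
    | none => simp [PySem.List.pyGetD_natCast]

theorem firstsFold_get? (rows : List (List (Option String))) (b : List (Option String))
    (k : Nat) :
    (rows.foldl firstsStep b)[k]? = b[k]?.map
      (fun f => match f with
        | some s => some s
        | none =>
          match rows.find? (fun row => truthyHeader (row.getD k none)) with
          | some row => row.getD k none
          | none => none) := by
  induction rows generalizing b with
  | nil =>
    rw [List.foldl_nil]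
    cases hb : b[k]? with
    | none => rfl
    | some f => cases f <;> rfl
  | cons r rs ih =>
    rw [List.foldl_cons, ih, firstsStep_get?, Option.map_map, List.find?_cons]
    cases hb : b[k]? with
    | none => rfl
    | some f =>
      simp only [Option.map_some, Function.comp]
      cases f with
      | some s => rfl
      | none =>
        by_cases ht : truthyHeader (r.getD k none)
        · rw [ht]
          simp only [cond_true]
          cases hc : r.getD k none with
          | none => rw [hc] at ht; simp [truthyHeader] at ht
          | some s => simp [hc]
        · have htf : truthyHeader (r.getD k none) = false := by simpa using ht
          rw [htf]
          simp only [cond_false]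
          rfl

-- A's phase-2 names in canonical per-column form
theorem phase2A_canon (rows : List (List (Option String))) :
    (PySem.List.enumerate (pyZipStar rows) 0).foldl
      (fun ns p =>
        ns ++ [match p.2.find? truthyHeader with
               | some s => s.getD ""
               | none => "miss" ++ PySem.Int.toStr (p.1 + 1)]) []
    = (List.range (minW rows)).map
        (fun k => match rows.find? (fun row => truthyHeader (row.getD k none)) with
                  | some row => (row.getD k none).getD ""
                  | none => "miss" ++ PySem.Int.toStr ((k : Int) + 1)) := by
  rw [PySem.List.foldl_append_singleton_eq_map, List.nil_append, pyZipStar_spec rows]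
  apply List.ext_getElem?
  intro i
  by_cases hi : i < minW rows
  · simp only [List.getElem?_map, PySem.List.getElem?_enumerate, List.getElem?_range hi,
      Option.map_some]
    congr 1
    rw [zero_add]
    have hfun : (truthyHeader ∘ fun r : List (Option String) => r.getD i none)
        = (fun row : List (Option String) => truthyHeader (row.getD i none)) := rfl
    rw [List.find?_map, hfun]
    cases hf : rows.find? (fun row : List (Option String) => truthyHeader (row.getD i none)) with
    | none => rfl
    | some row => rfl
  · rw [List.getElem?_eq_none, List.getElem?_eq_none]
    · simp only [List.length_map, List.length_range]; omega
    · simp only [List.length_map, PySem.List.length_enumerate, List.length_map,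
        List.length_range]; omega

-- B's fallback names (map over the folded accumulator) in the same canonical form
theorem phase2B_canon (rows : List (List (Option String))) :
    (PySem.List.enumerate
        (rows.foldl firstsStep (List.replicate (minW rows) none)) 0).map
      (fun p => match p.2 with
        | some s => s
        | none => "miss" ++ PySem.Int.toStr (p.1 + 1))
    = (List.range (minW rows)).map
        (fun k => match rows.find? (fun row => truthyHeader (row.getD k none)) with
                  | some row => (row.getD k none).getD ""
                  | none => "miss" ++ PySem.Int.toStr ((k : Int) + 1)) := by
  apply List.ext_getElem?
  intro i
  by_cases hi : i < minW rows
  · rw [List.getElem?_map, PySem.List.getElem?_enumerate, Option.map_map,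
        firstsFold_get?, Option.map_map, List.getElem?_map, List.getElem?_range hi,
        List.getElem?_replicate]
    rw [if_pos hi]
    simp only [Option.map_some, Function.comp, zero_add, Option.map_some]
    cases hf : rows.find? (fun row : List (Option String) => truthyHeader (row.getD i none)) with
    | none => rfl
    | some row =>
      have hp := List.find?_some hf
      cases hc : row.getD i none with
      | none => rw [hc] at hp; simp [truthyHeader] at hp
      | some s => simp only [List.getD] at hc; simp [hc]
  · rw [List.getElem?_eq_none, List.getElem?_eq_none]
    · simp only [List.length_map, List.length_range]; omega
    · simp only [List.length_map, PySem.List.length_enumerate, firstsFold_length,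
        List.length_replicate]; omega

-- ===== VERDICT (by name: the statement is the Claim_ definition above) =====
theorem create_column_names_spec : Claim_equal_create_column_names := by
  intro hr cols _
  unfold Spec_create_column_names
  simp only [create_column_names, create_column_names_alt]
  cases hr with
  | nil =>
    rw [if_neg (show ¬ ((List.length ([] : List (List (Option String))) : Int) ≥ 1) by simp)]
    rw [if_pos (show (List.isEmpty ([] : List (List (Option String)))) = true by simp)]
    exact (dedup_eq _).symm
  | cons r rs =>
    rw [if_pos (show ((r :: rs).length : Int) ≥ 1 by simp)]
    rw [if_neg (show ¬ ((r :: rs).isEmpty = true) by simp)]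
    rw [pvFlagFold fullPred (fun row => row.map (fun h => PySem.Str.strip (h.getD "")))]
    rw [show (fun (st : Option (List (Option String)) × List (Option String)) row =>
          (if st.1.isNone && row.all fullPred then some row else st.1,
           (PySem.List.enumerate st.2 0).map
             (fun p => match p.2 with
               | some s => some s
               | none =>
                 let c := PySem.List.pyGetD row p.1 none
                 if truthyHeader c then c else none)))
        = (fun (st : Option (List (Option String)) × List (Option String)) row =>
            (fullStep st.1 row, firstsStep st.2 row)) from rfl]
    rw [pair_fold_split, fullFold_find]
    rw [minW_min? (r :: rs) (by simp)]
    rw [show (((minW (r :: rs) : Nat) : Int)).toNat = minW (r :: rs) from Int.toNat_natCast _]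
    cases hf : (r :: rs).find? (fun row => row.all fullPred) with
    | some row =>
      simp only
      rw [if_neg (by simp)]
      exact (dedup_eq _).symm
    | none =>
      simp only
      rw [if_pos (by simp)]
      rw [phase2A_canon (r :: rs), ← phase2B_canon (r :: rs)]
      exact (dedup_eq _).symm
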